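-- pv_equiv track=rewrite | github.com/NicolaTea/University_Projects_Labs | Grundlagen_der_Programmierung/lab1/3b).py | langste_prim_teilfolge
-- ===== SOURCE A (Python) =====
-- def is_prime(x):
--    if x == 2:
--      return True
--    if x < 2 or x % 2 == 0:
--      return False
--
--    for i in range(3, int(x ** (1 / 2)) + 1, 2):
--       if x % i == 0:
--        return False
--
--    return True
--
-- def langste_prim_teilfolge(numbers):
--     if not numbers:
--         return []
--     max_length=0
--     max_teilfolge=[]
--
--     current_length = 0
--     current_teilfolge = []
--     for number in numbers:
--         if is_prime(number): #daca gasim nr prim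
--             current_length+=1
--             current_teilfolge.append(number) #adaugam in lista
--         else:
--             if current_length > max_length: #verificam care e maximul
--                 max_length = current_length
--                 max_teilfolge = current_teilfolge
--             current_length = 0
--             current_teilfolge = []
--
--
--     if current_length > max_length: #verificam care e maximul
--       max_teilfolge = current_teilfolge
--
--     return max_teilfolge
-- ===== SOURCE B (Python) =====
-- def is_prime(x):
--    if x == 2:
--      return True
--    if x < 2 or x % 2 == 0:
--      return False
--
--    for i in range(3, int(x ** (1 / 2)) + 1, 2):
--       if x % i == 0:
--        return False
--
--    return True
--
-- def langste_prim_teilfolge(numbers):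
--     # Stage 1: split the input into its maximal runs of consecutive primes.
--     runs = []
--     i, n = 0, len(numbers)
--     while i < n:
--         run = []
--         while i < n and is_prime(numbers[i]):
--             run.append(numbers[i])
--             i += 1
--         if run:
--             runs.append(run)
--         else:
--             i += 1
--     # Stage 2: pick the first run of maximal length (max keeps the first maximum).
--     return max(runs, key=len) if runs else []
-- ===== Notes on version B (the rewrite author's own statement) =====
-- stated objective: alternative
-- what changed: A is a single forward scan maintaining max/current length counters plus a trailing fix-up; B first materialises the list of ALL maximal prime runs (run-at-a-time splitting, no counters) and then selects the first longest run with max(key=len), i.e. staged passes over an intermediate list-of-runs instead of an online counter scan.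
import Mathlib
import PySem

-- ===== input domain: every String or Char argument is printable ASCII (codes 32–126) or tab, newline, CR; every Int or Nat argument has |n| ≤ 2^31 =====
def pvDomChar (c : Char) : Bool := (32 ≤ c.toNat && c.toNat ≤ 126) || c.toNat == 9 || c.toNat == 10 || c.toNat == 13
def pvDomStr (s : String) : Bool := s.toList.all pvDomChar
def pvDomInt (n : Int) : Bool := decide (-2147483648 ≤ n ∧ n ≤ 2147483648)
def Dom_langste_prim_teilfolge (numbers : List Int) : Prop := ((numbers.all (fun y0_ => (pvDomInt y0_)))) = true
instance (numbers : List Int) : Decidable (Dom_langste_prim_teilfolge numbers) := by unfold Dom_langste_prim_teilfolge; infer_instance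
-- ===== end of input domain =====

-- B replaces A's online counter scan (max/current lengths plus a trailing fix-up) by two
-- stages: first split the input into the list of ALL maximal prime runs, then pick the
-- first longest run; an alternative decomposition of similar cost.

-- ===== PORT A =====
-- int(x ** (1/2)) is ported as Nat.sqrt x.toNat: exact for 0 ≤ x ≤ 2^31
-- (double sqrt of such x errs by ≪ 1/2 ulp margin, and perfect squares are exact).
def is_prime (x : Int) : Bool :=
  if x == 2 then true
  else if x < 2 || PySem.Int.mod x 2 == 0 then false
  else if (PySem.List.pyRange 3 ((Nat.sqrt x.toNat : Int) + 1) 2).any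
            (fun i => PySem.Int.mod x i == 0) then false  -- for-loop with early `return False`
  else true

def aStep (s : Int × List Int × Int × List Int) (x : Int) : Int × List Int × Int × List Int :=
  match s with
  | (maxL, maxT, curL, curT) =>
    if is_prime x then (maxL, maxT, curL + 1, curT ++ [x])
    else if curL > maxL then (curL, curT, 0, []) else (maxL, maxT, 0, [])

-- final `if current_length > max_length` check, reading the state components
def aFin (s : Int × List Int × Int × List Int) : List Int :=
  if s.2.2.1 > s.1 then s.2.2.2 else s.2.1

def langste_prim_teilfolge (numbers : List Int) : List Int :=
  if numbers = [] then []
  else aFin (numbers.foldl aStep (0, [], 0, []))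

-- ===== PORT B =====
-- the inner `while rest and is_prime(rest[0]): run.append(...); rest = rest[1:]`,
-- returning (run, rest)
def splitRun (xs : List Int) : List Int × List Int :=
  match xs with
  | [] => ([], [])
  | x :: r =>
    if is_prime x then
      let p := splitRun r
      (x :: p.1, p.2)
    else ([], x :: r)

-- cited by collectRuns's termination proof
lemma splitRun_eq (xs : List Int) :
    splitRun xs = (xs.takeWhile (fun y => is_prime y), xs.dropWhile (fun y => is_prime y)) := by
  induction xs with
  | nil => rfl
  | cons x r ih =>
    by_cases hx : is_prime x <;>
      simp [splitRun, ih, hx, List.takeWhile_cons, List.dropWhile_cons]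

-- the outer `while rest:` loop of stage 1, building the list of maximal prime runs
def collectRuns (xs : List Int) : List (List Int) :=
  match xs with
  | [] => []
  | x :: r =>
    let p := splitRun (x :: r)
    if h : p.1 = [] then collectRuns r          -- run empty: rest = rest[1:]
    else p.1 :: collectRuns p.2                 -- record the run, continue after it
termination_by xs.length
decreasing_by
  · simp
  · rw [splitRun_eq]
    by_cases hx : is_prime x
    · simp only [List.dropWhile_cons, hx, if_pos, List.length_cons]
      have := List.length_dropWhile_le (fun y => is_prime y) r
      omega
    · exfalso; apply h; show (splitRun (x :: r)).1 = []
      rw [splitRun_eq]; simp [hx]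

def langste_prim_teilfolge_alt (numbers : List Int) : List Int :=
  let runs := collectRuns numbers
  -- stage 2: Python's `max(runs, key=len)` keeps the FIRST maximum — ported as this fold
  match runs with
  | [] => []
  | r :: rs => rs.foldl (fun b c => if b.length < c.length then c else b) r

-- ===== PRECONDITION & SPEC =====
def Spec_langste_prim_teilfolge (numbers : List Int) (out : List Int) : Prop := out = langste_prim_teilfolge_alt numbers
instance (numbers : List Int) (out : List Int) : Decidable (Spec_langste_prim_teilfolge numbers out) := by unfold Spec_langste_prim_teilfolge; infer_instance

-- ===== CLAIM (what is proved, stated in full; the proofs are below) =====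
def Claim_equal_langste_prim_teilfolge : Prop := ∀ (numbers : List Int), Dom_langste_prim_teilfolge numbers → Spec_langste_prim_teilfolge numbers (langste_prim_teilfolge numbers)

-- ===== LEMMAS AND PROOFS =====

-- Proof-only intermediate form: a backward one-pass fold computing
-- (prime run starting here, first longest run), used to bridge A's foldl and B's stages.
def altStep (x : Int) (s : List Int × List Int) : List Int × List Int :=
  if is_prime x then
    let pref := x :: s.1
    (pref, if pref.length ≥ s.2.length then pref else s.2)
  else ([], s.2)

lemma aStep_prime {x : Int} (hp : is_prime x = true) (mL cL : Int) (mT cT : List Int) :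
    aStep (mL, mT, cL, cT) x = (mL, mT, cL + 1, cT ++ [x]) := by
  simp [aStep, hp]

lemma aStep_notprime {x : Int} (hp : ¬ is_prime x = true) (mL cL : Int) (mT cT : List Int) :
    aStep (mL, mT, cL, cT) x =
      (if cL > mL then (cL, cT, 0, []) else (mL, mT, 0, [])) := by
  simp [aStep, hp]

lemma altStep_prime {x : Int} (hp : is_prime x = true) (p b : List Int) :
    altStep x (p, b) = (x :: p, if (x :: p).length ≥ b.length then x :: p else b) := by
  simp [altStep, hp]

lemma altStep_notprime {x : Int} (hp : ¬ is_prime x = true) (p b : List Int) :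
    altStep x (p, b) = ([], b) := by
  simp [altStep, hp]

-- invariant of the bridge fold: the best run is the current prefix run, or strictly longer
lemma alt_inv (xs : List Int) :
    (xs.foldr altStep ([], [])).2 = (xs.foldr altStep ([], [])).1 ∨
      (xs.foldr altStep ([], [])).1.length < (xs.foldr altStep ([], [])).2.length := by
  induction xs with
  | nil => left; rfl
  | cons x xs ih =>
    rcases hpb : xs.foldr altStep ([], []) with ⟨p, b⟩
    rw [hpb] at ih
    rw [List.foldr_cons, hpb]
    by_cases hp : is_prime x
    · rw [altStep_prime hp]
      by_cases hc : (x :: p).length ≥ b.length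
      · rw [if_pos hc]; left; rfl
      · rw [if_neg hc]; right
        simp only [List.length_cons] at hc ⊢; omega
    · rw [altStep_notprime hp]
      rcases b with _ | ⟨y, ys⟩
      · left; rfl
      · right; simp

-- generalized invariant linking A's folded state to the bridge fold
lemma key (xs : List Int) : ∀ (mT cT : List Int),
    aFin (xs.foldl aStep ((mT.length : Int), mT, (cT.length : Int), cT)) =
    (let pb := xs.foldr altStep ([], [])
     let c := if (cT ++ pb.1).length ≥ pb.2.length then cT ++ pb.1 else pb.2
     if c.length > mT.length then c else mT) := by
  induction xs with
  | nil =>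
    intro mT cT
    simp only [List.foldl_nil, List.foldr_nil, aFin, List.append_nil, List.length_nil,
      ge_iff_le, Nat.zero_le, if_pos]
    by_cases h : cT.length > mT.length
    · rw [if_pos (by exact_mod_cast h), if_pos h]
    · rw [if_neg (by exact_mod_cast h), if_neg h]
  | cons x xs ih =>
    intro mT cT
    rcases hpb : xs.foldr altStep ([], []) with ⟨p, b⟩
    have hinv : b = p ∨ p.length < b.length := by
      have h := alt_inv xs; rw [hpb] at h; exact h
    rw [List.foldl_cons, List.foldr_cons, hpb]
    by_cases hp : is_prime x
    · rw [aStep_prime hp, altStep_prime hp]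
      have h1 : ((mT.length : Int), mT, (cT.length : Int) + 1, cT ++ [x]) =
          ((mT.length : Int), mT, (((cT ++ [x]).length : Nat) : Int), cT ++ [x]) := by
        simp
      rw [h1, ih mT (cT ++ [x]), hpb]
      simp only [List.append_assoc, List.singleton_append, List.length_append,
        List.length_cons, ge_iff_le]
      split_ifs <;> first
        | rfl
        | (exfalso; simp_all only [List.length_cons, List.length_append]; omega)
    · rw [aStep_notprime hp, altStep_notprime hp]
      by_cases ht : (cT.length : Int) > ((mT.length : Int))
      · rw [if_pos ht]
        have ht' : cT.length > mT.length := by exact_mod_cast ht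
        have h1 : ((cT.length : Int), cT, (0 : Int), ([] : List Int)) =
            ((cT.length : Int), cT, ((([] : List Int).length : Nat) : Int), ([] : List Int)) := by
          simp
        rw [h1, ih cT [], hpb]
        simp only [List.nil_append, List.append_nil, ge_iff_le]
        rcases hinv with hbp | hbp
        · subst hbp
          split_ifs <;> first | rfl | (exfalso; omega)
        · split_ifs <;> first | rfl | (exfalso; omega)
      · rw [if_neg ht]
        have ht' : ¬ (cT.length > mT.length) := fun h => ht (by exact_mod_cast h)
        have h1 : ((mT.length : Int), mT, (0 : Int), ([] : List Int)) =
            ((mT.length : Int), mT, ((([] : List Int).length : Nat) : Int), ([] : List Int)) := by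
          simp
        rw [h1, ih mT [], hpb]
        simp only [List.nil_append, List.append_nil, ge_iff_le]
        rcases hinv with hbp | hbp
        · subst hbp
          split_ifs <;> first | rfl | (exfalso; omega)
        · split_ifs <;> first | rfl | (exfalso; omega)

-- A equals the bridge fold's best component
lemma A_eq_bridge (numbers : List Int) :
    langste_prim_teilfolge numbers = (numbers.foldr altStep ([], [])).2 := by
  unfold langste_prim_teilfolge
  rcases hn : numbers with _ | ⟨x, xs⟩
  · rfl
  · rw [if_neg (by simp)]
    have h := key (x :: xs) [] []
    simp only [List.length_nil, Nat.cast_zero, List.nil_append] at h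
    rw [h]
    rcases hpb : (x :: xs).foldr altStep ([], []) with ⟨p, b⟩
    have hinv : b = p ∨ p.length < b.length := by
      have h2 := alt_inv (x :: xs); rw [hpb] at h2; exact h2
    simp only [ge_iff_le]
    rcases hinv with hbp | hbp
    · subst hbp
      split_ifs <;> first
        | rfl
        | (rename_i h1 h2; exfalso; omega)
        | (rename_i h1 h2
           have : b = [] := List.length_eq_zero_iff.mp (by omega)
           rw [this])
    · split_ifs <;> first
        | rfl
        | (exfalso; omega)
        | (rename_i h1 h2
           have : b = [] := List.length_eq_zero_iff.mp (by omega)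
           rw [this])

-- first longest run, accumulated from the right with ≥ so earlier runs win ties
def FM (runs : List (List Int)) : List Int :=
  runs.foldr (fun r b => if b.length ≤ r.length then r else b) []

lemma collectRuns_nil : collectRuns [] = [] := by rw [collectRuns]

lemma collectRuns_cons_notprime {x : Int} (hx : ¬ is_prime x = true) (r : List Int) :
    collectRuns (x :: r) = collectRuns r := by
  rw [collectRuns]
  simp [splitRun_eq, List.takeWhile_cons, hx]

lemma collectRuns_cons_prime {x : Int} (hx : is_prime x = true) (r : List Int) :
    collectRuns (x :: r) =
      (x :: r.takeWhile (fun y => is_prime y)) ::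
        collectRuns (r.dropWhile (fun y => is_prime y)) := by
  rw [collectRuns]
  simp [splitRun_eq, List.takeWhile_cons, List.dropWhile_cons, hx]

lemma bridge_fst (xs : List Int) :
    (xs.foldr altStep ([], [])).1 = xs.takeWhile (fun y => is_prime y) := by
  induction xs with
  | nil => rfl
  | cons x r ih =>
    rw [List.foldr_cons]
    rcases hpb : r.foldr altStep ([], []) with ⟨p, b⟩
    rw [hpb] at ih
    simp only at ih
    by_cases hx : is_prime x
    · rw [altStep_prime hx, List.takeWhile_cons, if_pos hx]
      simp [ih]
    · rw [altStep_notprime hx, List.takeWhile_cons, if_neg hx]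

-- the bridge fold's best run is the first longest of the collected runs
lemma FM_cons (r : List Int) (rs : List (List Int)) :
    FM (r :: rs) = if (FM rs).length ≤ r.length then r else FM rs := by
  simp [FM]

lemma bridge_snd (xs : List Int) :
    (xs.foldr altStep ([], [])).2 = FM (collectRuns xs) := by
  induction xs with
  | nil => simp [collectRuns_nil, FM]
  | cons x r ih =>
    rw [List.foldr_cons]
    rcases hpb : r.foldr altStep ([], []) with ⟨p, b⟩
    rw [hpb] at ih
    simp only at ih
    have hp1 : p = r.takeWhile (fun y => is_prime y) := by
      have h := bridge_fst r; rw [hpb] at h; exact h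
    by_cases hx : is_prime x
    · rw [altStep_prime hx, collectRuns_cons_prime hx, FM_cons, ← hp1]
      simp only [ge_iff_le, List.length_cons]
      set q := FM (collectRuns (r.dropWhile (fun y => is_prime y))) with hq
      rcases hp : p with _ | ⟨y, p'⟩
      · -- run after x is empty, so dropWhile r = r and q = FM (collectRuns r) = b
        have hdw : r.dropWhile (fun y => is_prime y) = r := by
          rcases hr : r with _ | ⟨z, r'⟩
          · rfl
          · have hz : ¬ is_prime z = true := by
              intro hz
              rw [hp, hr, List.takeWhile_cons, if_pos hz] at hp1
              exact absurd hp1 (by simp)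
            rw [List.dropWhile_cons, if_neg hz]
        have hqb : q = b := by rw [hq, hdw, ← ih]
        rw [hqb]
        simp only [List.length_nil]
        split_ifs <;> first | rfl | (exfalso; omega)
      · -- run after x is nonempty: collectRuns r = p :: collectRuns (dropWhile r)
        rcases hr : r with _ | ⟨z, r'⟩
        · rw [hr] at hp1; rw [hp] at hp1; exact absurd hp1 (by simp)
        · have hz : is_prime z = true := by
            by_contra hz
            rw [hr, List.takeWhile_cons, if_neg hz] at hp1
            rw [hp1] at hp; exact absurd hp (by simp)
          have hcr : collectRuns r = p :: collectRuns (r.dropWhile (fun y => is_prime y)) := by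
            rw [hr, collectRuns_cons_prime hz, ← hr]
            congr 1
            · rw [hp1, hr, List.takeWhile_cons, if_pos hz]
            · rw [hr, List.dropWhile_cons, if_pos hz]
          have hb : b = if q.length ≤ p.length then p else q := by
            rw [ih, hcr, FM_cons, hq]
          rw [hb, hp]
          have hyl : (y :: p').length = p'.length + 1 := rfl
          simp only [List.length_cons]
          split_ifs <;> first | rfl | (exfalso; omega)
    · rw [altStep_notprime hx, collectRuns_cons_notprime hx]
      simpa using ih

-- B's stage-2 fold computes FM
lemma foldl_max_eq_FM (rs : List (List Int)) : ∀ (a : List Int),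
    rs.foldl (fun b c => if b.length < c.length then c else b) a =
      if (FM rs).length ≤ a.length then a else FM rs := by
  induction rs with
  | nil => intro a; simp [FM]
  | cons c rs ih =>
    intro a
    rw [List.foldl_cons, ih, FM_cons]
    split_ifs <;> first | rfl | (exfalso; omega)

lemma alt_eq_FM (numbers : List Int) :
    langste_prim_teilfolge_alt numbers = FM (collectRuns numbers) := by
  unfold langste_prim_teilfolge_alt
  rcases h : collectRuns numbers with _ | ⟨r, rs⟩
  · simp [FM]
  · simp only
    rw [foldl_max_eq_FM, FM_cons]

-- ===== VERDICT (by name: the statement is the Claim_ definition above) =====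
theorem langste_prim_teilfolge_spec : Claim_equal_langste_prim_teilfolge := by
  intro numbers _
  unfold Spec_langste_prim_teilfolge
  rw [A_eq_bridge, bridge_snd, alt_eq_FM]
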